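-- pv_equiv track=rewrite | github.com/LofOWL/Jupyter-code-tracker | other_tools/lib/notebook_utils.py | merge_split
-- ===== SOURCE A (Python) =====
-- def merge_split(lines_mapping):
-- 	merge,split = dict(),dict()
-- 	for line in lines_mapping:
-- 		merge[line[0][0]] = []
-- 		split[line[1][0]] = []
--
-- 	for line in lines_mapping:
-- 		if line[1][0] not in merge.get(line[0][0]):
-- 			merge[line[0][0]] = merge.get(line[0][0]) + [line[1][0]]
-- 		if line[0][0] not in split.get(line[1][0]):
-- 			split[line[1][0]] = split.get(line[1][0]) + [line[0][0]]
--
-- 	return list(merge.items()),list(split.items())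
-- ===== SOURCE B (Python) =====
-- def merge_split(lines_mapping):
-- 	def side(key, val):
-- 		keys = dict.fromkeys(key(l) for l in lines_mapping)
-- 		return [(k, list(dict.fromkeys(val(l) for l in lines_mapping if key(l) == k)))
-- 		        for k in keys]
-- 	return (side(lambda l: l[0][0], lambda l: l[1][0]),
-- 	        side(lambda l: l[1][0], lambda l: l[0][0]))
-- ===== Notes on version B (the rewrite author's own statement) =====
-- stated objective: alternative
-- what changed: A incrementally builds two dicts of lists (seed every key with [], then dedup-on-insert with a membership test per line); B builds no incremental adjacency state at all: it computes the distinct key list per side, then answers each key by one comprehension scan over lines_mapping with a final dedup, trading A's grouping dicts for per-key scans.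
import Mathlib
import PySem

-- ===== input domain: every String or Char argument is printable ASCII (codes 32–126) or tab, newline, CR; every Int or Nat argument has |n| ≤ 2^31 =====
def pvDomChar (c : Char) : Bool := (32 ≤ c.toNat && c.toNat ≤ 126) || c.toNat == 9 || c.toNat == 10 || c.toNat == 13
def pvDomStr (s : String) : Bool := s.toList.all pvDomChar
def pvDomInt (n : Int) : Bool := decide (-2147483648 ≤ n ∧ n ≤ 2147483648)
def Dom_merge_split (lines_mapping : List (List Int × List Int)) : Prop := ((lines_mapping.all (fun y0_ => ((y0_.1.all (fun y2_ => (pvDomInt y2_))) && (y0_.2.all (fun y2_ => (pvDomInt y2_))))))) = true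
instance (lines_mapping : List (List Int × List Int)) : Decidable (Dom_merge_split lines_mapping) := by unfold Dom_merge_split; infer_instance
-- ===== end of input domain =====

-- B keeps no incremental adjacency dicts: it computes each side's distinct key list and answers
-- every key by one comprehension scan over lines_mapping with a final dedup (objective: alternative).

-- line[0][0] / line[1][0]; exact under Pre_merge_split (both inner lists nonempty)
def msKeyL (line : List Int × List Int) : Int := PySem.List.pyGetD line.1 0 0
def msKeyR (line : List Int × List Int) : Int := PySem.List.pyGetD line.2 0 0

-- ===== PORT A =====
def merge_split (lines_mapping : List (List Int × List Int)) : (List (Int × List Int)) × (List (Int × List Int)) :=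
  -- first loop: merge[line[0][0]] = []; split[line[1][0]] = []
  let seeded : PySem.Dict Int (List Int) × PySem.Dict Int (List Int) :=
    lines_mapping.foldl
      (fun ms line => (ms.1.insert (msKeyL line) [], ms.2.insert (msKeyR line) []))
      (PySem.Dict.empty, PySem.Dict.empty)
  -- second loop: append the neighbor unless already present
  let filled : PySem.Dict Int (List Int) × PySem.Dict Int (List Int) :=
    lines_mapping.foldl
      (fun ms line =>
        ((if (ms.1.getD (msKeyL line) []).contains (msKeyR line) then ms.1
          else ms.1.insert (msKeyL line) (ms.1.getD (msKeyL line) [] ++ [msKeyR line])),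
         (if (ms.2.getD (msKeyR line) []).contains (msKeyL line) then ms.2
          else ms.2.insert (msKeyR line) (ms.2.getD (msKeyR line) [] ++ [msKeyL line]))))
      seeded
  (filled.1.items, filled.2.items)

-- ===== PORT B =====
def merge_split_alt (lines_mapping : List (List Int × List Int)) : (List (Int × List Int)) × (List (Int × List Int)) :=
  -- side(key, val): dict.fromkeys (= PySem.List.dedup) of the key projection, then for each key one
  -- comprehension scan of lines_mapping (filter + map) deduplicated with dict.fromkeys
  let side : ((List Int × List Int) → Int) → ((List Int × List Int) → Int) → List (Int × List Int) :=
    fun f g =>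
      (PySem.List.dedup (lines_mapping.map f)).map
        (fun k => (k, PySem.List.dedup ((lines_mapping.filter (fun l => f l == k)).map g)))
  (side msKeyL msKeyR, side msKeyR msKeyL)

-- ===== PRECONDITION & SPEC =====
-- Pre_ excludes exactly the inputs where some line's first or second inner list is empty: there
-- A raises IndexError on line[0][0] / line[1][0] (and B raises identically).
def Pre_merge_split (lines_mapping : List (List Int × List Int)) : Prop :=
  ∀ line ∈ lines_mapping, line.1 ≠ [] ∧ line.2 ≠ []
instance (lines_mapping : List (List Int × List Int)) : Decidable (Pre_merge_split lines_mapping) := by unfold Pre_merge_split; infer_instance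
def pvWitness_merge_split : (List (List Int × List Int)) := [([1, 5], [2]), ([1], [3]), ([1], [2, 7])]

def Spec_merge_split (lines_mapping : List (List Int × List Int)) (out : (List (Int × List Int)) × (List (Int × List Int))) : Prop := out = merge_split_alt lines_mapping
instance (lines_mapping : List (List Int × List Int)) (out : (List (Int × List Int)) × (List (Int × List Int))) : Decidable (Spec_merge_split lines_mapping out) := by unfold Spec_merge_split; infer_instance

-- ===== CLAIM (what is proved, stated in full; the proofs are below) =====
def Claim_equal_merge_split : Prop := ∀ (lines_mapping : List (List Int × List Int)), Dom_merge_split lines_mapping → Pre_merge_split lines_mapping → Spec_merge_split lines_mapping (merge_split lines_mapping)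

-- ===== LEMMAS AND PROOFS =====

-- a fold over a pair whose components do not interact splits into two folds
theorem msFoldlPair {α β γ : Type} (F : α → γ → α) (G : β → γ → β) (L : List γ) (a : α) (b : β) :
    L.foldl (fun ms x => (F ms.1 x, G ms.2 x)) (a, b) = (L.foldl F a, L.foldl G b) := by
  induction L generalizing a b with
  | nil => rfl
  | cons p L ih => simp [List.foldl_cons, ih]

-- A's two one-dict loops, parameterized by the key/value projections (f = key, g = appended value)
def msSeed (f : (List Int × List Int) → Int) (L : List (List Int × List Int)) : PySem.Dict Int (List Int) :=
  L.foldl (fun d p => d.insert (f p) []) PySem.Dict.empty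

def msFill (f g : (List Int × List Int) → Int) (L : List (List Int × List Int)) (d : PySem.Dict Int (List Int)) : PySem.Dict Int (List Int) :=
  L.foldl (fun d p =>
    if (d.getD (f p) []).contains (g p) then d
    else d.insert (f p) (d.getD (f p) [] ++ [g p])) d

theorem msSeed_keys (f : (List Int × List Int) → Int) (L : List (List Int × List Int)) :
    (msSeed f L).keys = PySem.Set.ofList (L.map f) := by
  unfold msSeed
  rw [PySem.Dict.keys_foldl_insert_key]
  simp [PySem.Set.update, PySem.Set.ofList_eq_foldl, PySem.Dict.keys_empty]

theorem msSeed_nodup (f : (List Int × List Int) → Int) (L : List (List Int × List Int)) :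
    (msSeed f L).keys.Nodup :=
  PySem.Dict.nodup_keys_foldl_insert_key L f _ PySem.Dict.empty PySem.Dict.nodup_keys_empty

theorem msSeed_getD (f : (List Int × List Int) → Int) (L : List (List Int × List Int)) (c : Int) :
    (msSeed f L).getD c [] = [] := by
  have H : ∀ (d : PySem.Dict Int (List Int)), (∀ k, d.getD k ([]:List Int) = []) →
      ∀ k, (L.foldl (fun d p => d.insert (f p) []) d).getD k [] = [] := by
    induction L with
    | nil => intro d hd k; exact hd k
    | cons p L ih =>
      intro d hd k
      simp only [List.foldl_cons]
      apply ih
      intro j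
      rw [PySem.Dict.getD_insert]
      split <;> simp [hd]
  exact H _ (fun k => PySem.Dict.getD_empty ..) c

theorem msFill_keys (f g : (List Int × List Int) → Int) (L : List (List Int × List Int))
    (d : PySem.Dict Int (List Int)) (h : ∀ p ∈ L, d.contains (f p) = true) :
    (msFill f g L d).keys = d.keys := by
  unfold msFill
  induction L generalizing d with
  | nil => rfl
  | cons p L ih =>
    simp only [List.foldl_cons]
    have hp := h p (by simp)
    by_cases hc : (d.getD (f p) []).contains (g p) = true
    · rw [if_pos hc]; exact ih d (fun q hq => h q (by simp [hq]))
    · rw [if_neg hc]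
      rw [ih _ (fun q hq => by simp [PySem.Dict.contains_insert, h q (List.mem_cons_of_mem _ hq)])]
      exact PySem.Dict.keys_insert_of_contains d _ hp

theorem msFill_getD (f g : (List Int × List Int) → Int) (L : List (List Int × List Int))
    (d : PySem.Dict Int (List Int)) (c : Int) :
    (msFill f g L d).getD c [] =
      ((L.filter (fun p => f p == c)).map g).foldl PySem.Set.add (d.getD c []) := by
  unfold msFill
  induction L generalizing d with
  | nil => rfl
  | cons p L ih =>
    simp only [List.foldl_cons]
    by_cases hc : (d.getD (f p) []).contains (g p) = true
    · rw [if_pos hc, ih]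
      by_cases hk : f p = c
      · subst hk
        rw [List.filter_cons_of_pos (by simp), List.map_cons, List.foldl_cons,
            PySem.Set.add_of_mem (List.mem_of_elem_eq_true hc)]
      · rw [List.filter_cons_of_neg (by simpa using hk)]
    · rw [if_neg hc, ih]
      by_cases hk : f p = c
      · subst hk
        rw [List.filter_cons_of_pos (by simp), List.map_cons, List.foldl_cons,
            PySem.Dict.getD_insert_self,
            PySem.Set.add_of_not_mem (fun hm => hc (List.elem_eq_true_of_mem hm))]
      · rw [List.filter_cons_of_neg (by simpa using hk),
            PySem.Dict.getD_insert_of_ne d _ _ (Ne.symm hk)]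

-- per-side main lemma: A's fill-over-seed items equal B's per-key scans
theorem msMain (f g : (List Int × List Int) → Int) (L : List (List Int × List Int)) :
    (msFill f g L (msSeed f L)).items
      = (PySem.List.dedup (L.map f)).map
          (fun k => (k, PySem.List.dedup ((L.filter (fun l => f l == k)).map g))) := by
  have hkeysF : (msFill f g L (msSeed f L)).keys = (msSeed f L).keys := by
    apply msFill_keys
    intro p hp
    rw [PySem.Dict.contains_eq_decide_mem_keys, msSeed_keys]
    simp only [decide_eq_true_eq, PySem.Set.mem_ofList]
    exact List.mem_map_of_mem hp
  have hnodupF : (msFill f g L (msSeed f L)).keys.Nodup := hkeysF ▸ msSeed_nodup f L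
  rw [PySem.Dict.items_eq_map_keys _ hnodupF ([]:List Int), hkeysF, msSeed_keys,
      ← PySem.List.dedup_eq_ofList]
  apply List.map_congr_left
  intro k hk
  rw [msFill_getD, msSeed_getD, PySem.List.dedup_eq_ofList, PySem.Set.ofList_eq_foldl]

-- ===== VERDICT (by name: the statement is the Claim_ definition above) =====
theorem merge_split_spec : Claim_equal_merge_split := by
  intro L _ _
  show merge_split L = merge_split_alt L
  have h1 := msMain msKeyL msKeyR L
  have h2 := msMain msKeyR msKeyL L
  simp only [msSeed, msFill] at h1 h2
  have e1 : ∀ (a b : PySem.Dict Int (List Int)),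
      L.foldl (fun ms line => (ms.1.insert (msKeyL line) ([]:List Int), ms.2.insert (msKeyR line) ([]:List Int))) (a, b)
        = (L.foldl (fun d line => d.insert (msKeyL line) []) a, L.foldl (fun d line => d.insert (msKeyR line) []) b) :=
    fun a b => msFoldlPair (fun d line => d.insert (msKeyL line) []) (fun d line => d.insert (msKeyR line) []) L a b
  have e2 : ∀ (a b : PySem.Dict Int (List Int)),
      L.foldl (fun ms line =>
          ((if (ms.1.getD (msKeyL line) []).contains (msKeyR line) then ms.1
            else ms.1.insert (msKeyL line) (ms.1.getD (msKeyL line) [] ++ [msKeyR line])),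
           (if (ms.2.getD (msKeyR line) []).contains (msKeyL line) then ms.2
            else ms.2.insert (msKeyR line) (ms.2.getD (msKeyR line) [] ++ [msKeyL line])))) (a, b)
        = (L.foldl (fun d line =>
              if (d.getD (msKeyL line) []).contains (msKeyR line) then d
              else d.insert (msKeyL line) (d.getD (msKeyL line) [] ++ [msKeyR line])) a,
           L.foldl (fun d line =>
              if (d.getD (msKeyR line) []).contains (msKeyL line) then d
              else d.insert (msKeyR line) (d.getD (msKeyR line) [] ++ [msKeyL line])) b) :=
    fun a b => msFoldlPair (fun d line =>
              if (d.getD (msKeyL line) []).contains (msKeyR line) then d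
              else d.insert (msKeyL line) (d.getD (msKeyL line) [] ++ [msKeyR line]))
        (fun d line =>
              if (d.getD (msKeyR line) []).contains (msKeyL line) then d
              else d.insert (msKeyR line) (d.getD (msKeyR line) [] ++ [msKeyL line])) L a b
  simp only [merge_split, merge_split_alt, e1, e2]
  exact Prod.ext h1 h2
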